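-- pv_equiv track=rewrite | github.com/Mickleburg/alpha-pii-guard | src/ner/labeling.py | _deduplicate_spans
-- ===== SOURCE A (Python) =====
-- from typing import List, Tuple, Dict
--
-- def _deduplicate_spans(spans: List[Tuple[int, int, str]]) -> List[Tuple[int, int, str]]:
--     """Remove duplicate and overlapping spans."""
--     if not spans:
--         return []
--
--     # Sort by (start, -length) to keep longer spans
--     sorted_spans = sorted(spans, key=lambda x: (x[0], -(x[1] - x[0])))
--
--     result = []
--     covered = set()
--
--     for start, end, category in sorted_spans:
--         # Check if covered by existing span
--         is_covered = any(pos in covered for pos in range(start, end))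
--
--         if not is_covered:
--             result.append((start, end, category))
--             for pos in range(start, end):
--                 covered.add(pos)
--
--     return result
-- ===== SOURCE B (Python) =====
-- from typing import List, Tuple
--
-- def _deduplicate_spans(spans: List[Tuple[int, int, str]]) -> List[Tuple[int, int, str]]:
--     """Remove duplicate and overlapping spans, keeping earlier/longer ones.
--
--     Sorted by (start, -length) the accepted non-empty spans have strictly
--     increasing ends, so a candidate overlaps the accepted ones exactly when
--     its start is below the largest accepted end: O(n log n), no covered set.
--     """
--     result = []
--     max_end = None
--     for start, end, category in sorted(spans, key=lambda x: (x[0], x[0] - x[1])):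
--         if start >= end:
--             # empty span: covers no position, always kept
--             result.append((start, end, category))
--         elif max_end is None or start >= max_end:
--             result.append((start, end, category))
--             max_end = end
--     return result
-- ===== Notes on version B (the rewrite author's own statement) =====
-- stated objective: faster
-- what changed: Replaces the per-position covered set and the per-span scan of every position in range(start,end) with a single running maximum accepted end: after the same (start,-length) sort a span overlaps iff its start is below that maximum, so the O(total span length) set bookkeeping disappears.
import Mathlib
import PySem

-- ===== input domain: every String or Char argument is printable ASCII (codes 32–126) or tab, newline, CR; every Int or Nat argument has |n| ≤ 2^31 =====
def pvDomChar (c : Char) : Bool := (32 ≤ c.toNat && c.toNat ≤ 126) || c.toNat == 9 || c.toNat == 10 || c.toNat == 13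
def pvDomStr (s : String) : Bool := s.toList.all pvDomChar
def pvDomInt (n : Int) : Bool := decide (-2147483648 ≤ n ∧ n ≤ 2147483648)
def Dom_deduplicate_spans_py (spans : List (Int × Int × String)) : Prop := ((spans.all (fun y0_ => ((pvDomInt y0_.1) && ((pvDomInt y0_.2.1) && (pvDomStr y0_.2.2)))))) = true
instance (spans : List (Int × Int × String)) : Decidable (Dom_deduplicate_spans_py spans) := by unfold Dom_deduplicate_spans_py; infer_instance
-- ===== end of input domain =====

-- B replaces A's per-position covered set (scanned for every position of every span) by a single
-- running maximum accepted end after the same (start, -length) sort; return values are proved equal.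

-- ===== PORT A =====
def deduplicate_spans_py (spans : List (Int × Int × String)) : List (Int × Int × String) :=
  if spans = [] then []
  else
    -- sorted(spans, key=lambda x: (x[0], -(x[1] - x[0])))
    let sorted_spans := PySem.List.sorted2 spans (fun x => x.1) (fun x => -(x.2.1 - x.1))
    -- result = []; covered = set(); for start, end, category in sorted_spans: …
    (sorted_spans.foldl
      (fun (st : List (Int × Int × String) × Std.HashSet Int) sp =>
        let is_covered := (PySem.List.pyRange sp.1 sp.2.1 1).any
          (fun pos => st.2.contains pos)
        if is_covered then st
        else (st.1 ++ [sp],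
              (PySem.List.pyRange sp.1 sp.2.1 1).foldl (fun c pos => c.insert pos) st.2))
      ([], ∅)).1

-- ===== PORT B =====
def deduplicate_spans_py_alt (spans : List (Int × Int × String)) : List (Int × Int × String) :=
  -- result = []; max_end = None; for start, end, category in sorted(spans, key=…): …
  ((PySem.List.sorted2 spans (fun x => x.1) (fun x => x.1 - x.2.1)).foldl
    (fun (st : List (Int × Int × String) × Option Int) sp =>
      if sp.2.1 ≤ sp.1 then (st.1 ++ [sp], st.2)
      else
        match st.2 with
        | none => (st.1 ++ [sp], some sp.2.1)
        | some m => if m ≤ sp.1 then (st.1 ++ [sp], some sp.2.1) else st)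
    ([], none)).1

-- ===== PRECONDITION & SPEC =====
def Spec_deduplicate_spans_py (spans : List (Int × Int × String)) (out : List (Int × Int × String)) : Prop := out = deduplicate_spans_py_alt spans
instance (spans : List (Int × Int × String)) (out : List (Int × Int × String)) : Decidable (Spec_deduplicate_spans_py spans out) := by unfold Spec_deduplicate_spans_py; infer_instance

-- ===== CLAIM (what is proved, stated in full; the proofs are below) =====
def Claim_equal_deduplicate_spans_py : Prop := ∀ (spans : List (Int × Int × String)), Dom_deduplicate_spans_py spans → Spec_deduplicate_spans_py spans (deduplicate_spans_py spans)

-- ===== LEMMAS AND PROOFS =====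

-- A's loop step
def pvStepA (st : List (Int × Int × String) × Std.HashSet Int) (sp : Int × Int × String) :
    List (Int × Int × String) × Std.HashSet Int :=
  let is_covered := (PySem.List.pyRange sp.1 sp.2.1 1).any (fun pos => st.2.contains pos)
  if is_covered then st
  else (st.1 ++ [sp],
        (PySem.List.pyRange sp.1 sp.2.1 1).foldl (fun c pos => c.insert pos) st.2)

-- B's loop step
def pvStepB (st : List (Int × Int × String) × Option Int) (sp : Int × Int × String) :
    List (Int × Int × String) × Option Int :=
  if sp.2.1 ≤ sp.1 then (st.1 ++ [sp], st.2)
  else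
    match st.2 with
    | none => (st.1 ++ [sp], some sp.2.1)
    | some m => if m ≤ sp.1 then (st.1 ++ [sp], some sp.2.1) else st

-- coupling invariant between A's covered set and B's max_end over the remaining spans l
def pvInv (l : List (Int × Int × String)) (covered : Std.HashSet Int) (me : Option Int) : Prop :=
  match me with
  | none => covered = ∅
  | some m => ∃ s : Int, (∀ sp ∈ l, s ≤ sp.1) ∧
      (∀ p : Int, s ≤ p → p < m → p ∈ covered) ∧ (∀ p ∈ covered, p < m)

-- membership in a fold of inserts
lemma pvMem_foldl_insert (l : List Int) (s : Std.HashSet Int) (y : Int) :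
    y ∈ l.foldl (fun c pos => c.insert pos) s ↔ y ∈ s ∨ y ∈ l := by
  induction l generalizing s with
  | nil => simp
  | cons x xs ih =>
    rw [List.foldl_cons, ih]
    simp only [Std.HashSet.mem_insert, beq_iff_eq, List.mem_cons]
    tauto

-- insertBy preserves Pairwise R for any relation the comparator totally decides
lemma pvPairwise_insertBy {α : Type} (before : α → α → Bool) (R : α → α → Prop)
    (htrans : ∀ a b c, R a b → R b c → R a c)
    (h1 : ∀ a b, before a b = true → R a b) (h2 : ∀ a b, before a b = false → R b a)
    (x : α) (ys : List α) (hys : ys.Pairwise R) :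
    (PySem.List.insertBy before x ys).Pairwise R := by
  induction ys with
  | nil => simp [PySem.List.insertBy]
  | cons y ys ih =>
    rw [List.pairwise_cons] at hys
    by_cases hb : before x y = true
    · simp only [PySem.List.insertBy, hb, if_true]
      refine List.Pairwise.cons ?_ (List.Pairwise.cons hys.1 hys.2)
      intro z hz
      rcases List.mem_cons.mp hz with rfl | hz
      · exact h1 _ _ hb
      · exact htrans _ _ _ (h1 _ _ hb) (hys.1 z hz)
    · simp only [PySem.List.insertBy, hb]
      refine List.Pairwise.cons ?_ (ih hys.2)
      intro z hz
      rcases (PySem.List.mem_insertBy _ _ _ _).mp hz with rfl | hz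
      · exact h2 _ _ (Bool.not_eq_true _ ▸ hb)
      · exact hys.1 z hz

lemma pvPairwise_foldl_insertBy {α : Type} (before : α → α → Bool) (R : α → α → Prop)
    (htrans : ∀ a b c, R a b → R b c → R a c)
    (h1 : ∀ a b, before a b = true → R a b) (h2 : ∀ a b, before a b = false → R b a)
    (xs acc : List α) (hacc : acc.Pairwise R) :
    (xs.foldl (fun acc x => PySem.List.insertBy before x acc) acc).Pairwise R := by
  induction xs generalizing acc with
  | nil => exact hacc
  | cons x xs ih =>
    exact ih _ (pvPairwise_insertBy before R htrans h1 h2 x acc hacc)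

-- the sorted list has nondecreasing starts
lemma pvSorted2_eq_foldl (spans : List (Int × Int × String)) (k2 : (Int × Int × String) → Int) :
    PySem.List.sorted2 spans (fun x => x.1) k2 =
      spans.foldl (fun acc x => PySem.List.insertBy
        (fun a b => decide (a.1 < b.1) || (!decide (b.1 < a.1) && decide (k2 a < k2 b))) x acc) [] := rfl

lemma pvSorted2_starts_mono (spans : List (Int × Int × String)) (k2 : (Int × Int × String) → Int) :
    (PySem.List.sorted2 spans (fun x => x.1) k2).Pairwise (fun a b => a.1 ≤ b.1) := by
  have h : (PySem.List.sorted2 spans (fun x => x.1) k2).Pairwise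
      (fun a b => a.1 < b.1 ∨ (a.1 = b.1 ∧ k2 a ≤ k2 b)) := by
    rw [pvSorted2_eq_foldl]
    apply pvPairwise_foldl_insertBy
    · rintro a b c (h1 | ⟨h1, h1'⟩) (h2 | ⟨h2, h2'⟩) <;> [left; left; left; right] <;> omega
    · intro a b hb
      simp only [Bool.or_eq_true, Bool.and_eq_true, Bool.not_eq_true', decide_eq_true_eq,
        decide_eq_false_iff_not] at hb
      omega
    · intro a b hb
      simp only [Bool.or_eq_false_iff, Bool.and_eq_false_iff, Bool.not_eq_false',
        decide_eq_true_eq, decide_eq_false_iff_not] at hb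
      omega
    · exact List.Pairwise.nil
  exact h.imp (by rintro a b (h | ⟨h, _⟩) <;> omega)

-- main coupling lemma: the two folds produce the same result list
lemma pvFold_eq (l : List (Int × Int × String)) (res : List (Int × Int × String))
    (covered : Std.HashSet Int) (me : Option Int)
    (hpair : l.Pairwise (fun a b => a.1 ≤ b.1)) (hinv : pvInv l covered me) :
    (l.foldl pvStepA (res, covered)).1 = (l.foldl pvStepB (res, me)).1 := by
  induction l generalizing res covered me with
  | nil => rfl
  | cons sp rest ih =>
    rw [List.pairwise_cons] at hpair
    obtain ⟨hhead, hrest⟩ := hpair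
    by_cases he : sp.2.1 ≤ sp.1
    · -- empty range: both accept, state components unchanged
      have hr : PySem.List.pyRange sp.1 sp.2.1 1 = [] := PySem.List.pyRange_one_eq_nil he
      simp only [List.foldl_cons, pvStepA, pvStepB, hr, List.any_nil, he, if_true]
      apply ih _ _ _ hrest
      cases me with
      | none => exact hinv
      | some m =>
        obtain ⟨s, hfut, hcov, hub⟩ := hinv
        exact ⟨s, fun x hx => hfut x (List.mem_cons_of_mem _ hx), hcov, hub⟩
    · push Not at he
      cases me with
      | none =>
        -- covered is empty: A cannot find a covered position, both accept
        subst hinv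
        have hany : (PySem.List.pyRange sp.1 sp.2.1 1).any
            (fun pos => (∅ : Std.HashSet Int).contains pos) = false := by
          simp
        simp only [List.foldl_cons, pvStepA, pvStepB, hany, if_false, not_le.mpr he]
        apply ih _ _ _ hrest
        refine ⟨sp.1, fun x hx => hhead x hx, ?_, ?_⟩
        · intro p hp1 hp2
          rw [pvMem_foldl_insert]
          exact Or.inr (PySem.List.mem_pyRange_one.mpr ⟨hp1, hp2⟩)
        · intro p hp
          rcases (pvMem_foldl_insert _ _ _).mp hp with h | hb
          · exact absurd h (by simp)
          · exact (PySem.List.mem_pyRange_one.mp hb).2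
      | some m =>
        obtain ⟨s, hfut, hcov, hub⟩ := hinv
        have hs : s ≤ sp.1 := hfut sp List.mem_cons_self
        by_cases hm : m ≤ sp.1
        · -- start ≥ max_end: nothing of the span is covered, both accept
          have hany : (PySem.List.pyRange sp.1 sp.2.1 1).any
              (fun pos => covered.contains pos) = false := by
            rw [List.any_eq_false]
            intro p hp
            have := (PySem.List.mem_pyRange_one.mp hp).1
            simp only [Bool.not_eq_true]
            rw [← Bool.not_eq_true, Std.HashSet.contains_iff_mem]
            intro hmem
            exact absurd (hub p hmem) (by omega)
          simp only [List.foldl_cons, pvStepA, pvStepB, hany, if_false, not_le.mpr he, if_true, hm]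
          apply ih _ _ _ hrest
          refine ⟨sp.1, fun x hx => hhead x hx, ?_, ?_⟩
          · intro p hp1 hp2
            rw [pvMem_foldl_insert]
            exact Or.inr (PySem.List.mem_pyRange_one.mpr ⟨hp1, hp2⟩)
          · intro p hp
            rcases (pvMem_foldl_insert _ _ _).mp hp with h | hb
            · have := hub p h; omega
            · exact (PySem.List.mem_pyRange_one.mp hb).2
        · -- start < max_end: sp.1 itself is covered, both reject
          push Not at hm
          have hany : (PySem.List.pyRange sp.1 sp.2.1 1).any
              (fun pos => covered.contains pos) = true := by
            rw [List.any_eq_true]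
            exact ⟨sp.1, PySem.List.mem_pyRange_one.mpr ⟨le_refl _, he⟩,
              Std.HashSet.contains_iff_mem.mpr (hcov sp.1 hs hm)⟩
          simp only [List.foldl_cons, pvStepA, pvStepB, hany, if_true, not_le.mpr he, if_false,
            not_le.mpr hm]
          apply ih _ _ _ hrest
          exact ⟨s, fun x hx => hfut x (List.mem_cons_of_mem _ hx), hcov, hub⟩

-- the two sort keys are the same function
lemma pvKeys_eq : (fun x : Int × Int × String => -(x.2.1 - x.1)) = (fun x : Int × Int × String => x.1 - x.2.1) := by
  funext x; ring

-- ===== VERDICT (by name: the statement is the Claim_ definition above) =====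
theorem deduplicate_spans_py_spec : Claim_equal_deduplicate_spans_py := by
  intro spans _
  unfold Spec_deduplicate_spans_py deduplicate_spans_py deduplicate_spans_py_alt
  by_cases hnil : spans = []
  · subst hnil
    simp [PySem.List.sorted2]
  · rw [if_neg hnil, ← pvKeys_eq]
    exact pvFold_eq _ [] ∅ none
      (pvSorted2_starts_mono spans _) rfl
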